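-- pv_equiv track=rewrite | github.com/Kahabk/RL_proj | Q_lerning.py | get_sensors
-- ===== SOURCE A (Python) =====
-- PLAYER_Y = 520
--
-- def get_sensors(player_lane, obstacles):
--     left = front = right = 1
--
--     for lane, y in obstacles:
--         if y > PLAYER_Y - 120:
--             if lane == player_lane:
--                 front = 0
--             elif lane == player_lane - 1:
--                 left = 0
--             elif lane == player_lane + 1:
--                 right = 0
--
--     return left, front, right
-- ===== SOURCE B (Python) =====
-- PLAYER_Y = 520
--
-- def _blocked(lane, obstacles):
--     # short-circuit scan: is there a nearby obstacle in this exact lane?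
--     return any(l == lane and y > PLAYER_Y - 120 for l, y in obstacles)
--
-- def get_sensors(player_lane, obstacles):
--     # three independent per-lane scans instead of one mutating three-flag pass
--     return (1 - _blocked(player_lane - 1, obstacles),
--             1 - _blocked(player_lane, obstacles),
--             1 - _blocked(player_lane + 1, obstacles))
-- ===== Notes on version B (the rewrite author's own statement) =====
-- stated objective: simpler
-- what changed: Replaces the single mutating elif-chain pass over three flag variables with three independent short-circuiting per-lane any() scans, each flag computed arithmetically as 1 - blocked(lane).
import Mathlib
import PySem

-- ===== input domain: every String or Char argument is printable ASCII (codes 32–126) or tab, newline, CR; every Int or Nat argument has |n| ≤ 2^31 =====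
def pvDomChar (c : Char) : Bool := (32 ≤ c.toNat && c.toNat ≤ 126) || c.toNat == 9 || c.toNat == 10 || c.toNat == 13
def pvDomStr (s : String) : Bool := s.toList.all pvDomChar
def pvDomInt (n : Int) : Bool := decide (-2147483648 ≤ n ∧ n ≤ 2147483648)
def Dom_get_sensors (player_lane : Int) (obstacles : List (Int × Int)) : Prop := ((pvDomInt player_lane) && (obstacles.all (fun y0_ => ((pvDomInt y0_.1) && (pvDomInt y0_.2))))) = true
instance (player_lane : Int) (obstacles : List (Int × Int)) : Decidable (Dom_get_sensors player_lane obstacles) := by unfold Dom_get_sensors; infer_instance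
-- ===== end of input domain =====

-- B replaces the one mutating elif-chain pass with three independent per-lane any() scans (simpler decomposition).

-- ===== PORT A =====
-- literal port: one pass updating the three flags with the elif chain
def get_sensors (player_lane : Int) (obstacles : List (Int × Int)) : Int × Int × Int :=
  obstacles.foldl (fun (s : Int × Int × Int) (p : Int × Int) =>
    if p.2 > 520 - 120 then
      if p.1 == player_lane then (s.1, 0, s.2.2)
      else if p.1 == player_lane - 1 then (0, s.2.1, s.2.2)
      else if p.1 == player_lane + 1 then (s.1, s.2.1, 0)
      else s
    else s) (1, 1, 1)

-- ===== PORT B =====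
-- port of Source B's _blocked: a short-circuiting any() over the obstacles
def pvBlocked (lane : Int) (obstacles : List (Int × Int)) : Bool :=
  obstacles.any (fun p => p.1 == lane && decide (p.2 > 520 - 120))

def get_sensors_alt (player_lane : Int) (obstacles : List (Int × Int)) : Int × Int × Int :=
  (1 - (if pvBlocked (player_lane - 1) obstacles then 1 else 0),
   1 - (if pvBlocked player_lane obstacles then 1 else 0),
   1 - (if pvBlocked (player_lane + 1) obstacles then 1 else 0))

-- ===== PRECONDITION & SPEC =====
def Spec_get_sensors (player_lane : Int) (obstacles : List (Int × Int)) (out : Int × Int × Int) : Prop := out = get_sensors_alt player_lane obstacles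
instance (player_lane : Int) (obstacles : List (Int × Int)) (out : Int × Int × Int) : Decidable (Spec_get_sensors player_lane obstacles out) := by unfold Spec_get_sensors; infer_instance

-- ===== CLAIM (what is proved, stated in full; the proofs are below) =====
def Claim_equal_get_sensors : Prop := ∀ (player_lane : Int) (obstacles : List (Int × Int)), Dom_get_sensors player_lane obstacles → Spec_get_sensors player_lane obstacles (get_sensors player_lane obstacles)

-- ===== LEMMAS AND PROOFS =====

-- pvBlocked on a cons: head test or the rest
theorem pvBlocked_cons (q l y : Int) (t : List (Int × Int)) :
    pvBlocked q ((l, y) :: t) = ((l == q && decide (y > 400)) || pvBlocked q t) := by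
  simp [pvBlocked]

-- the A-loop, run from any start state, zeroes each flag exactly when its lane is blocked
theorem get_sensors_fold (player_lane : Int) (obstacles : List (Int × Int)) (s : Int × Int × Int) :
    obstacles.foldl (fun (s : Int × Int × Int) (p : Int × Int) =>
      if p.2 > 520 - 120 then
        if p.1 == player_lane then (s.1, 0, s.2.2)
        else if p.1 == player_lane - 1 then (0, s.2.1, s.2.2)
        else if p.1 == player_lane + 1 then (s.1, s.2.1, 0)
        else s
      else s) s
    = ((if pvBlocked (player_lane - 1) obstacles then 0 else s.1),
       (if pvBlocked player_lane obstacles then 0 else s.2.1),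
       (if pvBlocked (player_lane + 1) obstacles then 0 else s.2.2)) := by
  induction obstacles generalizing s with
  | nil => simp [pvBlocked]
  | cons p t ih =>
    obtain ⟨lane, y⟩ := p
    obtain ⟨l, fr, r⟩ := s
    rw [List.foldl_cons]
    by_cases hy : (y : Int) > 520 - 120
    · have hyd : decide ((y : Int) > 400) = true := by simpa using hy
      rw [if_pos hy]
      rcases eq_or_ne lane player_lane with h | h
      · have e1 : (lane == player_lane - 1) = false := by simp; omega
        have e2 : (lane == player_lane) = true := by simpa using h
        have e3 : (lane == player_lane + 1) = false := by simp; omega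
        rw [if_pos e2, ih, pvBlocked_cons, pvBlocked_cons, pvBlocked_cons, e1, e2, e3, hyd]
        simp
      · rcases eq_or_ne lane (player_lane - 1) with h1 | h1
        · have e1 : (lane == player_lane - 1) = true := by simpa using h1
          have e2 : (lane == player_lane) = false := by simpa using h
          have e3 : (lane == player_lane + 1) = false := by simp; omega
          rw [if_neg (by simp [e2]), if_pos e1, ih, pvBlocked_cons, pvBlocked_cons, pvBlocked_cons, e1, e2, e3, hyd]
          simp
        · rcases eq_or_ne lane (player_lane + 1) with h2 | h2
          · have e1 : (lane == player_lane - 1) = false := by simpa using h1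
            have e2 : (lane == player_lane) = false := by simpa using h
            have e3 : (lane == player_lane + 1) = true := by simpa using h2
            rw [if_neg (by simp [e2]), if_neg (by simp [e1]), if_pos e3, ih, pvBlocked_cons, pvBlocked_cons, pvBlocked_cons, e1, e2, e3, hyd]
            simp
          · have e1 : (lane == player_lane - 1) = false := by simpa using h1
            have e2 : (lane == player_lane) = false := by simpa using h
            have e3 : (lane == player_lane + 1) = false := by simpa using h2
            rw [if_neg (by simp [e2]), if_neg (by simp [e1]), if_neg (by simp [e3]), ih, pvBlocked_cons, pvBlocked_cons, pvBlocked_cons, e1, e2, e3]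
            simp
    · have hyd : decide ((y : Int) > 400) = false := by simpa using hy
      rw [if_neg hy, ih, pvBlocked_cons, pvBlocked_cons, pvBlocked_cons, hyd]
      simp

-- ===== VERDICT (by name: the statement is the Claim_ definition above) =====
theorem get_sensors_spec : Claim_equal_get_sensors := by
  intro player_lane obstacles _
  unfold Spec_get_sensors get_sensors get_sensors_alt
  rw [get_sensors_fold]
  split_ifs <;> rfl
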